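-- pv_equiv track=rewrite | github.com/Nattapong-top/Learning-Python | Python101_Pythonic/07-String-Processing/ex07_03_More_String_Processing_Examples_00.py | rot5_digits
-- ===== SOURCE A (Python) =====
-- def rot5_digits(s:str):
--     new_s = ''
--     num = '0123456789'
--     for i in range(len(s)):
--         if s[i].isdigit():
--             idx = num.find(s[i])
--             new_s += num[(idx+5) % 10]
--         else:
--             new_s += s[i]
--     return new_s
-- ===== SOURCE B (Python) =====
-- def rot5_digits(s: str):
--     table = str.maketrans('0123456789', '5678901234')
--     return s.translate(table)
-- ===== Notes on version B (the rewrite author's own statement) =====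
-- stated objective: idiomatic
-- what changed: Replaces the per-index loop with num.find lookups and repeated string concatenation by a precomputed digit->digit translation table (str.maketrans) applied in one s.translate pass.
import Mathlib
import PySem

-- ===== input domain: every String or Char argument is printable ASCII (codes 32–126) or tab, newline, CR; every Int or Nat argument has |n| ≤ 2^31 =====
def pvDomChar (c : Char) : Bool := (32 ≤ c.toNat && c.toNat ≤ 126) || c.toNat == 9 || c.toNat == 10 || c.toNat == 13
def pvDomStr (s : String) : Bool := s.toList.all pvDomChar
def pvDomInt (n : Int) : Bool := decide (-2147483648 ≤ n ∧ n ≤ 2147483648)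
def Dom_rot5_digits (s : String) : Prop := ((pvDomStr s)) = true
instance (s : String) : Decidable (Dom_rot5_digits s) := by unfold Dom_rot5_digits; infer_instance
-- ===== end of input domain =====

-- B replaces A's per-index loop (find + concatenation) by a precomputed digit translation table
-- applied in one pass (idiomatic; same asymptotic cost).

-- ===== PORT A =====
-- literal transliteration of A: loop over range(len(s)), test s[i].isdigit(),
-- look the digit up in num with find, append character by character.
def rot5_numA : List Char := ['0','1','2','3','4','5','6','7','8','9']  -- = "0123456789".toList

def rot5_digitsA (cs : List Char) : List Char :=
  (PySem.List.pyRange 0 (PySem.List.len cs) 1).foldl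
    (fun acc i =>
      let c := PySem.List.pyGetD cs i 'a'
      if PySem.Chars.strIsdigit [c] then
        let idx := PySem.Chars.find rot5_numA [c]
        acc ++ [PySem.List.pyGetD rot5_numA (PySem.Int.mod (idx + 5) 10) 'a']
      else
        acc ++ [c]) []

def rot5_digits (s : String) : String := String.ofList (rot5_digitsA s.toList)

-- ===== PORT B =====
-- B builds a translation table (dict from digit to its ROT5 image) and translates
-- in one pass; characters not in the table map to themselves (str.translate).
def rot5_table : PySem.Dict Char Char :=
  PySem.Dict.ofList (List.zip "0123456789".toList "5678901234".toList)

def rot5_digits_alt (s : String) : String :=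
  String.ofList (s.toList.map (fun c => PySem.Dict.getD rot5_table c c))

-- ===== PRECONDITION & SPEC =====
def Spec_rot5_digits (s : String) (out : String) : Prop := out = rot5_digits_alt s
instance (s : String) (out : String) : Decidable (Spec_rot5_digits s out) := by unfold Spec_rot5_digits; infer_instance

-- ===== CLAIM (what is proved, stated in full; the proofs are below) =====
def Claim_equal_rot5_digits : Prop := ∀ (s : String), Dom_rot5_digits s → Spec_rot5_digits s (rot5_digits s)

-- ===== LEMMAS AND PROOFS =====

-- pointwise: A's per-character result equals the table lookup, for every character
theorem rot5_point (c : Char) :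
    (if PySem.Chars.strIsdigit [c] then
        PySem.List.pyGetD rot5_numA (PySem.Int.mod (PySem.Chars.find rot5_numA [c] + 5) 10) 'a'
      else c) = PySem.Dict.getD rot5_table c c := by
  by_cases hd : PySem.Chars.strIsdigit [c] = true
  · have h0 : '0' ≤ c ∧ c ≤ '9' := by
      simp [PySem.Chars.strIsdigit, PySem.Chars.isdigit] at hd
      exact hd
    have hlo : 48 ≤ c.toNat := h0.1
    have hhi : c.toNat ≤ 57 := h0.2
    have hofNat : Char.ofNat c.toNat = c := Char.ofNat_toNat c
    interval_cases h : c.toNat <;>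
      (rw [← hofNat]; decide)
  · have hd' : PySem.Chars.isdigit c = false := by
      simpa [PySem.Chars.strIsdigit] using hd
    have hne : ∀ d ∈ rot5_numA, c ≠ d := by
      intro d hdm hceq
      subst hceq
      fin_cases hdm <;> simp [PySem.Chars.isdigit] at hd'
    have h0 := hne '0' (by decide); have h1 := hne '1' (by decide)
    have h2 := hne '2' (by decide); have h3 := hne '3' (by decide)
    have h4 := hne '4' (by decide); have h5 := hne '5' (by decide)
    have h6 := hne '6' (by decide); have h7 := hne '7' (by decide)
    have h8 := hne '8' (by decide); have h9 := hne '9' (by decide)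
    have htab : rot5_table = PySem.Dict.mk
        [('0','5'),('1','6'),('2','7'),('3','8'),('4','9'),
         ('5','0'),('6','1'),('7','2'),('8','3'),('9','4')] := by rfl
    rw [if_neg hd, htab]
    simp [PySem.Dict.getD, PySem.Dict.get?,
      Ne.symm h0, Ne.symm h1, Ne.symm h2, Ne.symm h3, Ne.symm h4,
      Ne.symm h5, Ne.symm h6, Ne.symm h7, Ne.symm h8, Ne.symm h9]

-- ===== VERDICT (by name: the statement is the Claim_ definition above) =====
theorem rot5_digits_spec : Claim_equal_rot5_digits := by
  intro s _
  unfold Spec_rot5_digits rot5_digits rot5_digits_alt rot5_digitsA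
  congr 1
  rw [PySem.List.foldl_pyRange_zero_pyGetD s.toList 'a'
      (fun acc c =>
        if PySem.Chars.strIsdigit [c] then
          acc ++ [PySem.List.pyGetD rot5_numA
            (PySem.Int.mod (PySem.Chars.find rot5_numA [c] + 5) 10) 'a']
        else acc ++ [c]) []]
  have hbody : ∀ (acc : List Char) (c : Char),
      (if PySem.Chars.strIsdigit [c] then
          acc ++ [PySem.List.pyGetD rot5_numA
            (PySem.Int.mod (PySem.Chars.find rot5_numA [c] + 5) 10) 'a']
        else acc ++ [c])
      = acc ++ [if PySem.Chars.strIsdigit [c] then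
          PySem.List.pyGetD rot5_numA
            (PySem.Int.mod (PySem.Chars.find rot5_numA [c] + 5) 10) 'a'
        else c] := by
    intro acc c; split <;> rfl
  calc List.foldl
        (fun acc c =>
          if PySem.Chars.strIsdigit [c] then
            acc ++ [PySem.List.pyGetD rot5_numA
              (PySem.Int.mod (PySem.Chars.find rot5_numA [c] + 5) 10) 'a']
          else acc ++ [c]) [] s.toList
      = List.foldl
          (fun acc c => acc ++ [if PySem.Chars.strIsdigit [c] then
              PySem.List.pyGetD rot5_numA
                (PySem.Int.mod (PySem.Chars.find rot5_numA [c] + 5) 10) 'a'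
            else c]) [] s.toList := by
        exact PySem.List.foldl_congr_mem _ _ _ _ (fun acc c _ => hbody acc c)
    _ = s.toList.map (fun c => if PySem.Chars.strIsdigit [c] then
            PySem.List.pyGetD rot5_numA
              (PySem.Int.mod (PySem.Chars.find rot5_numA [c] + 5) 10) 'a'
          else c) := by
        simpa using PySem.List.foldl_append_singleton_eq_map
          (fun c => if PySem.Chars.strIsdigit [c] then
            PySem.List.pyGetD rot5_numA
              (PySem.Int.mod (PySem.Chars.find rot5_numA [c] + 5) 10) 'a'
          else c) s.toList []
    _ = s.toList.map (fun c => PySem.Dict.getD rot5_table c c) :=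
        List.map_congr_left (fun c _ => rot5_point c)
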